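-- pv_equiv track=rewrite | github.com/buchanae/word-crosser | passing_window.py | passing_window
-- ===== SOURCE A (Python) =====
-- def passing_window(passing, window_size):
--     parts = []
--
--     for i in range(1, window_size + len(passing)):
--         if i <= len(passing):
--             part_length = i
--             part = passing[-part_length:]
--             padding = 0
--         elif i > window_size:
--             part_length = i - window_size
--             part = passing[:-part_length]
--             padding = window_size
--         else:
--             part = passing
--             padding = i
--
--         if len(part) > window_size:
--             part = part[:window_size]
--
--         part = part.rjust(padding)
--         parts.append(part)
--
--     return parts
-- ===== SOURCE B (Python) =====
-- def passing_window(passing, window_size):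
--     S = ' ' * max(0, window_size - 1) + passing
--     n = max(0, window_size + len(passing) - 1)
--     return [S[j:j + window_size] for j in range(n)][::-1]
-- ===== Notes on version B (the rewrite author's own statement) =====
-- stated objective: simpler
-- what changed: B left-pads the string once with window_size-1 spaces and takes uniform fixed-width slices of the padded string in one sweep (reversed), replacing A's per-index three-branch negative-slice/clip/rjust arithmetic.
-- outside the precondition, e.g. on passing_window('abc', -1): A returns [''], B returns ['ab']
import Mathlib
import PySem

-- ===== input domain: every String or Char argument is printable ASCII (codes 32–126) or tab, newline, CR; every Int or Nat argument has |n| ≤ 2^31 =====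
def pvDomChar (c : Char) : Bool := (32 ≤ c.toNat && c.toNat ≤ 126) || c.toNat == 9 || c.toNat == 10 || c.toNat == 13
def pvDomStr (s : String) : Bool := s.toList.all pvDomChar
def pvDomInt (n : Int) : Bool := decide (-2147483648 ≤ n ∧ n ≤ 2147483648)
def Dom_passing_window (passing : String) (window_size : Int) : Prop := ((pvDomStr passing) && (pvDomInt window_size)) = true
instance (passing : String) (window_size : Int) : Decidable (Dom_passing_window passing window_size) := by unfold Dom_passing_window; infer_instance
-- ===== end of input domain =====

-- B builds the padded string once and takes uniform fixed-width slices (reversed): simpler than A's three-branch slice/clip/rjust arithmetic.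

-- ===== PORT A =====
-- s.rjust(width): pad with spaces on the left up to width (no-op for width ≤ len); exact for Python str.rjust
def pwRjust (width : Int) (cs : List Char) : List Char :=
  List.replicate (width.toNat - cs.length) ' ' ++ cs

-- one iteration of A's loop (the appended element for index i)
def pwBody (p : List Char) (w : Int) (i : Int) : String :=
  let pp : List Char × Int :=
    if i ≤ (p.length : Int) then
      (PySem.List.slice p (some (-i)) none, 0)          -- passing[-part_length:], part_length = i
    else if i > w then
      (PySem.List.slice p none (some (w - i)), w)       -- passing[:-(i - window_size)]
    else
      (p, i)
  let part := pp.1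
  let part := if ((part.length : Int) > w) then PySem.List.slice part none (some w) else part
  let part := pwRjust pp.2 part
  String.ofList part

def passing_window (passing : String) (window_size : Int) : List String :=
  (PySem.List.pyRange 1 (window_size + (passing.toList.length : Int)) 1).foldl
    (fun parts i => parts ++ [pwBody passing.toList window_size i]) []

-- ===== PORT B =====
def passing_window_alt (passing : String) (window_size : Int) : List String :=
  let S := List.replicate (window_size - 1).toNat ' ' ++ passing.toList   -- ' ' * max(0, window_size-1) + passing
  let n := max 0 (window_size + (passing.toList.length : Int) - 1)
  ((PySem.List.pyRange 0 n 1).map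
    (fun j => String.ofList (PySem.List.slice S (some j) (some (j + window_size))))).reverse

-- ===== PRECONDITION & SPEC =====
-- Pre_ excludes the meaningless corner of a negative window width that still yields loop
-- iterations (window_size < 0 with window_size + len(passing) > 1): there A's negative slice
-- widths and clip return accidental garbled fragments and B's uniform slices return different
-- ones — neither value is specifiable for a negative window. Degenerate negative widths with no
-- iterations (both sides return []) remain inside Pre_.
def Pre_passing_window (passing : String) (window_size : Int) : Prop :=
  0 ≤ window_size ∨ window_size + (passing.toList.length : Int) ≤ 1
instance (passing : String) (window_size : Int) : Decidable (Pre_passing_window passing window_size) := by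
  unfold Pre_passing_window; infer_instance

def pvWitness_passing_window : String × Int := ("abc", 3)

def Spec_passing_window (passing : String) (window_size : Int) (out : List String) : Prop :=
  out = passing_window_alt passing window_size
instance (passing : String) (window_size : Int) (out : List String) : Decidable (Spec_passing_window passing window_size out) := by
  unfold Spec_passing_window; infer_instance

-- ===== CLAIM (what is proved, stated in full; the proofs are below) =====
def Claim_equal_passing_window : Prop := ∀ (passing : String) (window_size : Int), Dom_passing_window passing window_size → Pre_passing_window passing window_size → Spec_passing_window passing window_size (passing_window passing window_size)

-- ===== LEMMAS AND PROOFS =====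

theorem pwFoldlPush {α β : Type} (f : α → β) (l : List α) (acc : List β) :
    l.foldl (fun parts i => parts ++ [f i]) acc = acc ++ l.map f := by
  induction l generalizing acc with
  | nil => simp
  | cons x xs ih => simp [ih]

theorem pwA_eq_map (passing : String) (w : Int) :
    passing_window passing w
      = (PySem.List.pyRange 1 (w + (passing.toList.length : Int)) 1).map (pwBody passing.toList w) := by
  unfold passing_window
  exact pwFoldlPush _ _ _

-- A's loop body equals the corresponding fixed-width window of the padded string (nonnegative width)
theorem pwBody_eq (p : List Char) (w i : Nat) (h1 : 1 ≤ i) (hi : i ≤ w + p.length - 1)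
    (hN : 1 ≤ w + p.length) :
    pwBody p (w : Int) (i : Int)
      = String.ofList (((List.replicate (w - 1) ' ' ++ p).drop (w + p.length - 1 - i)).take w) := by
  rcases Nat.eq_zero_or_pos w with hw0 | hw1
  · -- w = 0: every window is empty on both sides
    subst hw0
    have hiL : (i : Int) ≤ (p.length : Int) := by exact_mod_cast (by omega : i ≤ p.length)
    unfold pwBody
    rw [if_pos hiL]
    simp only
    rw [PySem.List.slice_from_neg_natCast p i (by omega)]
    have hlen : (p.drop (p.length - i)).length = i := by
      rw [List.length_drop]; omega
    have hclip : ((p.drop (p.length - i)).length : Int) > ((0:Nat) : Int) := by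
      rw [hlen]; exact_mod_cast h1
    rw [if_pos hclip]
    rw [PySem.List.slice_to _ (by norm_num)]
    simp [pwRjust]
  · unfold pwBody
    by_cases hiL : (i : Int) ≤ (p.length : Int)
    · -- branch 1: i ≤ len(p)
      have hiLn : i ≤ p.length := by exact_mod_cast hiL
      rw [if_pos hiL]
      simp only
      rw [PySem.List.slice_from_neg_natCast p i (by omega)]
      have hlen : (p.drop (p.length - i)).length = i := by
        rw [List.length_drop]; omega
      have hdropS : (List.replicate (w - 1) ' ' ++ p).drop (w + p.length - 1 - i)
          = p.drop (p.length - i) := by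
        rw [List.drop_append]
        rw [List.drop_replicate, List.length_replicate]
        have h0 : w - 1 - (w + p.length - 1 - i) = 0 := by omega
        have h2 : w + p.length - 1 - i - (w - 1) = p.length - i := by omega
        rw [h0, h2]
        simp
      rw [hdropS]
      by_cases hclip : ((p.drop (p.length - i)).length : Int) > ((w:Nat) : Int)
      · rw [if_pos hclip]
        rw [PySem.List.slice_to _ (by exact_mod_cast Nat.zero_le w)]
        simp [pwRjust]
      · rw [if_neg hclip]
        have hle : (p.drop (p.length - i)).length ≤ w := by
          rw [hlen] at hclip ⊢; omega
        rw [List.take_of_length_le hle]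
        simp [pwRjust]
    · -- i > len(p)
      have hiLn : p.length < i := by omega
      rw [if_neg hiL]
      -- RHS common shape: the drop lands inside the padding
      have hd : w + p.length - 1 - i ≤ w - 1 := by omega
      have hdropS : (List.replicate (w - 1) ' ' ++ p).drop (w + p.length - 1 - i)
          = List.replicate (i - p.length) ' ' ++ p := by
        rw [List.drop_append_of_le_length (by simpa using hd)]
        rw [List.drop_replicate]
        have h8 : w - 1 - (w + p.length - 1 - i) = i - p.length := by omega
        rw [h8]
      have htakeS : (List.replicate (i - p.length) ' ' ++ p).take w
          = List.replicate (i - p.length) ' ' ++ p.take (w + p.length - i) := by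
        rw [List.take_append]
        rw [List.take_replicate, List.length_replicate]
        have h3 : min w (i - p.length) = i - p.length := by omega
        have h4 : w - (i - p.length) = w + p.length - i := by omega
        rw [h3, h4]
      rw [hdropS, htakeS]
      by_cases hiw : (i : Int) > ((w:Nat) : Int)
      · -- branch 2: i > w
        have hiwn : w < i := by exact_mod_cast hiw
        rw [if_pos hiw]
        simp only
        have hneg : ((w:Nat) : Int) - (i : Int) = -(((i - w : Nat)) : Int) := by push_cast; omega
        rw [hneg, PySem.List.slice_to_neg_natCast p (i - w) (by omega)]
        have hlen2 : (p.take (p.length - (i - w))).length = w + p.length - i := by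
          rw [List.length_take]; omega
        have hnoclip : ¬ (((p.take (p.length - (i - w))).length : Int) > ((w:Nat) : Int)) := by
          rw [hlen2]; push_cast; omega
        rw [if_neg hnoclip]
        simp only [pwRjust, hlen2, Int.toNat_natCast]
        have h5 : w - (w + p.length - i) = i - p.length := by omega
        have h6 : p.length - (i - w) = w + p.length - i := by omega
        rw [h5, h6]
      · -- branch 3: len(p) < i ≤ w
        have hiwn : i ≤ w := by omega
        rw [if_neg hiw]
        simp only
        have hnoclip : ¬ ((p.length : Int) > ((w:Nat) : Int)) := by push_cast; omega
        rw [if_neg hnoclip]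
        simp only [pwRjust, Int.toNat_natCast]
        have h7 : p.take (w + p.length - i) = p := List.take_of_length_le (by omega)
        rw [h7]

theorem pw_main (passing : String) (window_size : Int)
    (hpre : Pre_passing_window passing window_size) :
    passing_window passing window_size = passing_window_alt passing window_size := by
  set p := passing.toList with hp
  by_cases hsmall : window_size + (p.length : Int) ≤ 1
  · -- both sides are empty
    rw [pwA_eq_map]
    unfold passing_window_alt
    simp only [← hp]
    have h1 : PySem.List.pyRange 1 (window_size + (p.length : Int)) 1 = [] := by
      apply List.eq_nil_of_length_eq_zero
      rw [PySem.List.length_pyRange_one]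
      omega
    have h2 : max 0 (window_size + ((p.length : Nat) : Int) - 1) = 0 := by omega
    rw [h1, h2, List.map_nil]
    have h3 : PySem.List.pyRange 0 0 1 = [] := by
      apply List.eq_nil_of_length_eq_zero
      rw [PySem.List.length_pyRange_one]
      simp
    rw [h3]
    simp
  · -- main case: Pre_ gives window_size ≥ 0, and at least one window
    have hw0 : 0 ≤ window_size := by
      rcases hpre with h | h
      · exact h
      · rw [← hp] at h; omega
    obtain ⟨w, rfl⟩ : ∃ w : Nat, window_size = (w : Int) :=
      ⟨window_size.toNat, (Int.toNat_of_nonneg hw0).symm⟩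
    have hN1 : 1 ≤ w + p.length := by omega
    set N : Nat := w + p.length - 1 with hNdef
    rw [pwA_eq_map]
    unfold passing_window_alt
    simp only [← hp]
    have hmax : max 0 ((w : Int) + ((p.length : Nat) : Int) - 1) = (N : Int) := by omega
    rw [hmax]
    have hS : ((w : Int) - 1).toNat = w - 1 := by omega
    apply List.ext_getElem
    · simp only [List.length_map, List.length_reverse, PySem.List.length_pyRange_one]
      omega
    · intro k hk1 hk2
      simp only [List.length_map, List.length_reverse, PySem.List.length_pyRange_one] at hk1 hk2
      have hkN : k < N := by omega
      simp only [List.getElem_reverse, List.getElem_map, List.length_map,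
        PySem.List.length_pyRange_one, PySem.List.getElem_pyRange_one, Int.sub_zero,
        Int.toNat_natCast, zero_add]
      have hcast : (1 : Int) + (k : Int) = ((k + 1 : Nat) : Int) := by push_cast; ring
      rw [hcast, pwBody_eq p w (k + 1) (by omega) (by omega) hN1, hS]
      have hj : ((N - 1 - k : Nat) : Int) + (w : Int) = ((N - 1 - k : Nat) : Int) + ((w : Nat) : Int) := rfl
      rw [hj, PySem.List.slice_natCast_add]
      have hidx : w + p.length - 1 - (k + 1) = N - 1 - k := by omega
      rw [hidx]

-- ===== VERDICT (by name: the statement is the Claim_ definition above) =====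
theorem passing_window_spec : Claim_equal_passing_window := by
  intro passing window_size _ hpre
  exact pw_main passing window_size hpre
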